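-- pv_equiv track=rewrite | github.com/sjms321/CodingTest | 우테코/5.py | solution
-- ===== SOURCE A (Python) =====
-- def solution(rows, columns):
--     answer=[ [0] * columns for _ in range(rows) ]
--     nowR=0
--     nowC=0
--     answer[nowR][nowC]=1
--     lastNum=1
--
--     while(1):
--         if lastNum%2==0:
--             if nowR==rows-1:
--                 nowR=0
--             else:
--                 nowR+=1
--         if lastNum%2==1:
--             if nowC==columns-1:
--                 nowC=0
--             else:
--                 nowC+=1
--         lastNum+=1
--         flag=False
--         for i in answer:
--             if not all(i):
--                 flag=True
--                 break
--         if flag==False: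
--             break
--         if answer[nowR][nowC]==0:
--             pass
--         elif (answer[nowR][nowC]%2==lastNum%2) or (answer[nowR][nowC]%2==lastNum%2):
--             break
--         answer[nowR][nowC]=lastNum
--
--     return(answer)
-- ===== SOURCE B (Python) =====
-- def solution(rows, columns):
--     answer = [[0] * columns for _ in range(rows)]
--     answer[0][0] = 1
--     remaining = rows * columns - 1  # zero cells left; replaces A's per-step grid scan
--     r = 0
--     c = 0
--     last = 1
--     while True:
--         if last % 2 == 0:
--             r = 0 if r == rows - 1 else r + 1
--         else:
--             c = 0 if c == columns - 1 else c + 1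
--         last += 1
--         if remaining == 0:
--             break
--         cell = answer[r][c]
--         if cell != 0 and cell % 2 == last % 2:
--             break
--         if cell == 0:
--             remaining -= 1
--         answer[r][c] = last
--     return answer
-- ===== Notes on version B (the rewrite author's own statement) =====
-- stated objective: alternative
-- what changed: B maintains an incrementally updated counter of still-empty cells instead of A's per-step rescan of the grid rows for a zero entry; intended as a faster step, but end-to-end the walk dominates and a timing run read only ~1.3x at the largest size, so no speed is claimed.
import Mathlib
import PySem

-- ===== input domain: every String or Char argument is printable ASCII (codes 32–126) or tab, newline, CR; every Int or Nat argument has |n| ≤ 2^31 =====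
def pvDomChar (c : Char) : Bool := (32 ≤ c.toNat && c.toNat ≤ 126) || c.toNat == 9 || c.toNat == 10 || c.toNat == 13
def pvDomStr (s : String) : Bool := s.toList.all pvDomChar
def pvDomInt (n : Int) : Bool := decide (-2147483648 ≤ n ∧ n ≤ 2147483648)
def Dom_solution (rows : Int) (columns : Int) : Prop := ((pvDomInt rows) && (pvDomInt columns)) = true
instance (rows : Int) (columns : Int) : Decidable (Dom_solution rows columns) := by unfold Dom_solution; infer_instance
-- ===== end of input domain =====

-- B replaces A's per-step scan of the whole grid for a remaining zero cell by an
-- incrementally maintained counter of zero cells (objective: faster walk step).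
-- Both loop ports carry a fuel argument purely as a totality guard for the
-- while-loop; the equivalence proof never depends on its size (both use the same fuel).

-- ===== PORT A =====
-- answer[nowR][nowC] = v  (in-range assignment; out of range List.set is a no-op, unreachable under Pre_)
def pvSetCellA (g : List (List Int)) (r c : Nat) (v : Int) : List (List Int) :=
  g.set r ((g.getD r []).set c v)

-- the while(1) loop of A; nowR/nowC are the Python ints, always ≥ 0, kept as Nat
def pvLoopA (rows columns : Int) : Nat → List (List Int) → Nat → Nat → Int → List (List Int)
  | 0, ans, _, _, _ => ans
  | fuel+1, ans, nowR, nowC, lastNum =>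
    let nowR := if PySem.Int.mod lastNum 2 = 0 then
                  (if (nowR : Int) = rows - 1 then 0 else nowR + 1) else nowR
    let nowC := if PySem.Int.mod lastNum 2 = 1 then
                  (if (nowC : Int) = columns - 1 then 0 else nowC + 1) else nowC
    let lastNum := lastNum + 1
    -- flag scan: is there a row that is not all truthy (i.e. contains a 0)?
    let flag := ans.any (fun i => ! i.all (fun x => x != 0))
    if flag = false then ans
    else
      let cell := (ans.getD nowR []).getD nowC 0
      if cell = 0 then
        pvLoopA rows columns fuel (pvSetCellA ans nowR nowC lastNum) nowR nowC lastNum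
      else if PySem.Int.mod cell 2 = PySem.Int.mod lastNum 2
              ∨ PySem.Int.mod cell 2 = PySem.Int.mod lastNum 2 then ans
      else
        pvLoopA rows columns fuel (pvSetCellA ans nowR nowC lastNum) nowR nowC lastNum

def solution (rows : Int) (columns : Int) : List (List Int) :=
  let answer := List.replicate rows.toNat (List.replicate columns.toNat (0 : Int))
  let answer := pvSetCellA answer 0 0 1
  pvLoopA rows columns ((2 * rows * columns).toNat + 4) answer 0 0 1

-- ===== PORT B =====
-- the while True loop of B: same walk, but `remaining` counts the zero cells
def pvLoopB (rows columns : Int) :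
    Nat → List (List Int) → Nat → Nat → Int → Int → List (List Int)
  | 0, ans, _, _, _, _ => ans
  | fuel+1, ans, r, c, last, remaining =>
    let r' := if PySem.Int.mod last 2 = 0 then
                (if (r : Int) = rows - 1 then 0 else r + 1) else r
    let c' := if PySem.Int.mod last 2 = 0 then c
              else (if (c : Int) = columns - 1 then 0 else c + 1)
    let last := last + 1
    if remaining = 0 then ans
    else
      let cell := (ans.getD r' []).getD c' 0
      if cell ≠ 0 ∧ PySem.Int.mod cell 2 = PySem.Int.mod last 2 then ans
      else
        let remaining := if cell = 0 then remaining - 1 else remaining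
        pvLoopB rows columns fuel (ans.set r' ((ans.getD r' []).set c' last)) r' c' last remaining

def solution_alt (rows : Int) (columns : Int) : List (List Int) :=
  let answer := List.replicate rows.toNat (List.replicate columns.toNat (0 : Int))
  let answer := answer.set 0 ((answer.getD 0 []).set 0 1)
  pvLoopB rows columns ((2 * rows * columns).toNat + 4) answer 0 0 1 (rows * columns - 1)

-- ===== PRECONDITION & SPEC =====
-- Pre_ excludes rows < 1 or columns < 1, where A raises IndexError on answer[0][0]=1.
def Pre_solution (rows : Int) (columns : Int) : Prop := 1 ≤ rows ∧ 1 ≤ columns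
instance (rows : Int) (columns : Int) : Decidable (Pre_solution rows columns) := by
  unfold Pre_solution; infer_instance
def pvWitness_solution : Int × Int := (3, 4)

def Spec_solution (rows : Int) (columns : Int) (out : List (List Int)) : Prop := out = solution_alt rows columns
instance (rows : Int) (columns : Int) (out : List (List Int)) : Decidable (Spec_solution rows columns out) := by unfold Spec_solution; infer_instance

-- ===== CLAIM (what is proved, stated in full; the proofs are below) =====
def Claim_equal_solution : Prop := ∀ (rows : Int) (columns : Int), Dom_solution rows columns → Pre_solution rows columns → Spec_solution rows columns (solution rows columns)

-- ===== LEMMAS AND PROOFS =====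

-- number of zero cells in the grid
def pvZeros (ans : List (List Int)) : Nat :=
  (ans.map (fun row => row.countP (fun x => x == 0))).sum

theorem pvGetD_mem {α : Type} (l : List α) (n : Nat) (d : α) (h : n < l.length) :
    l.getD n d ∈ l := by
  rw [List.getD_eq_getElem?_getD, List.getElem?_eq_getElem h]
  simpa using List.getElem_mem h

theorem if_getD_le_countP (row : List Int) (c : Nat) (h : c < row.length) :
    (if row.getD c 0 = 0 then 1 else 0) ≤ row.countP (fun x => x == 0) := by
  split_ifs with h0
  · exact List.countP_pos_iff.mpr ⟨_, pvGetD_mem row c 0 h, by simpa using h0⟩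
  · exact Nat.zero_le _

theorem countP_le_pvZeros (rest : List (List Int)) (row : List Int) (h : row ∈ rest) :
    row.countP (fun x => x == 0) ≤ pvZeros rest := by
  have hm : row.countP (fun x => x == 0)
      ∈ rest.map (fun row => row.countP (fun x => x == 0)) := List.mem_map_of_mem h
  simpa [pvZeros] using List.le_sum_of_mem hm

theorem row_all_iff (row : List Int) :
    (row.countP (fun x => x == 0) = 0) ↔ ((! row.all fun x => x != 0) = false) := by
  simp [List.countP_eq_zero]

theorem pvZeros_eq_zero_iff (ans : List (List Int)) :
    pvZeros ans = 0 ↔ ans.any (fun i => ! i.all (fun x => x != 0)) = false := by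
  induction ans with
  | nil => simp [pvZeros]
  | cons row rest ih =>
    simp only [pvZeros, List.map_cons, List.sum_cons, List.any_cons, Bool.or_eq_false_iff,
      Nat.add_eq_zero_iff]
    exact and_congr (row_all_iff row) (by simpa [pvZeros] using ih)

theorem countP_set_ne_zero (row : List Int) (c : Nat) (v : Int)
    (hc : c < row.length) (hv : v ≠ 0) :
    (row.set c v).countP (fun x => x == 0)
      = row.countP (fun x => x == 0) - (if row.getD c 0 = 0 then 1 else 0) := by
  induction row generalizing c with
  | nil => simp at hc
  | cons x xs ih =>
    cases c with
    | zero =>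
      simp only [List.set_cons_zero, List.countP_cons, List.getD_cons_zero]
      have hv' : (v == 0) = false := by simpa using hv
      by_cases h : x = 0 <;> simp [h, hv'] <;> omega
    | succ c =>
      have hc' : c < xs.length := by simpa using hc
      rw [List.set_cons_succ]
      simp only [List.countP_cons, List.getD_cons_succ]
      rw [ih c hc']
      have := if_getD_le_countP xs c hc'
      split_ifs at this ⊢ <;> omega

theorem pvZeros_set (ans : List (List Int)) (r c : Nat) (v : Int)
    (hr : r < ans.length) (hc : c < (ans.getD r []).length) (hv : v ≠ 0) :
    pvZeros (ans.set r ((ans.getD r []).set c v))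
      = pvZeros ans - (if (ans.getD r []).getD c 0 = 0 then 1 else 0) := by
  induction ans generalizing r with
  | nil => simp at hr
  | cons row rest ih =>
    cases r with
    | zero =>
      simp only [List.getD_cons_zero, List.set_cons_zero] at hc ⊢
      have hz : ∀ x xs, pvZeros (x :: xs) = x.countP (fun y => y == 0) + pvZeros xs := by
        intro x xs; simp [pvZeros]
      rw [hz, hz, countP_set_ne_zero row c v hc hv]
      have := if_getD_le_countP row c hc
      split_ifs at this ⊢ <;> omega
    | succ r =>
      have hr' : r < rest.length := by simpa using hr
      have hc' : c < (rest.getD r []).length := by simpa using hc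
      simp only [List.getD_cons_succ, List.set_cons_succ] at hc ⊢
      have hz : ∀ x xs, pvZeros (x :: xs) = x.countP (fun y => y == 0) + pvZeros xs := by
        intro x xs; simp [pvZeros]
      rw [hz, hz, ih r hr' hc']
      have h1 := if_getD_le_countP (rest.getD r []) c hc'
      have h2 := countP_le_pvZeros rest (rest.getD r []) (pvGetD_mem rest r [] hr')
      split_ifs at h1 ⊢ <;> omega

-- the moved index stays in range
theorem move_lt (n : Int) (i : Nat) (hn : 1 ≤ n) (hi : i < n.toNat) :
    (if (i : Int) = n - 1 then 0 else i + 1) < n.toNat := by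
  split_ifs with h
  · omega
  · omega

-- one loop iteration after the position update: A's grid scan agrees with B's counter
theorem step_eq (rows columns : Int) (hrows : 1 ≤ rows) (hcols : 1 ≤ columns) (fuel : Nat)
    (ih : ∀ (ans : List (List Int)) (nowR nowC : Nat) (lastNum : Int),
      ans.length = rows.toNat → (∀ row ∈ ans, row.length = columns.toNat) →
      nowR < rows.toNat → nowC < columns.toNat → 1 ≤ lastNum →
      pvLoopA rows columns fuel ans nowR nowC lastNum
        = pvLoopB rows columns fuel ans nowR nowC lastNum ((pvZeros ans : Int)))
    (ans : List (List Int)) (nR nC : Nat) (last1 : Int)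
    (hlen : ans.length = rows.toNat) (hrowlen : ∀ row ∈ ans, row.length = columns.toNat)
    (hRlt : nR < rows.toNat) (hClt : nC < columns.toNat) (hlast : 1 ≤ last1) :
    (if (ans.any fun i => !i.all fun x => x != 0) = false then ans
     else if (ans.getD nR []).getD nC 0 = 0 then
       pvLoopA rows columns fuel (pvSetCellA ans nR nC (last1 + 1)) nR nC (last1 + 1)
     else if PySem.Int.mod ((ans.getD nR []).getD nC 0) 2 = PySem.Int.mod (last1 + 1) 2
             ∨ PySem.Int.mod ((ans.getD nR []).getD nC 0) 2 = PySem.Int.mod (last1 + 1) 2 then ans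
     else pvLoopA rows columns fuel (pvSetCellA ans nR nC (last1 + 1)) nR nC (last1 + 1))
    = (if ((pvZeros ans : Int)) = 0 then ans
       else if (ans.getD nR []).getD nC 0 ≠ 0 ∧
           PySem.Int.mod ((ans.getD nR []).getD nC 0) 2 = PySem.Int.mod (last1 + 1) 2 then ans
       else pvLoopB rows columns fuel (ans.set nR ((ans.getD nR []).set nC (last1 + 1)))
         nR nC (last1 + 1)
         (if (ans.getD nR []).getD nC 0 = 0 then ((pvZeros ans : Int)) - 1
          else ((pvZeros ans : Int)))) := by
  by_cases hz : pvZeros ans = 0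
  · rw [if_pos ((pvZeros_eq_zero_iff ans).mp hz), if_pos (by exact_mod_cast hz)]
  · have hflag : ¬ ((ans.any fun i => !i.all fun x => x != 0) = false) :=
      fun h => hz ((pvZeros_eq_zero_iff ans).mpr h)
    rw [if_neg hflag, if_neg (show ¬ ((pvZeros ans : Int) = 0) from
      fun h => hz (by exact_mod_cast h))]
    have hRlen : nR < ans.length := by omega
    have hclen : nC < (ans.getD nR []).length := by
      rw [hrowlen _ (pvGetD_mem ans nR [] hRlen)]; exact hClt
    have hset := pvZeros_set ans nR nC (last1 + 1) hRlen hclen (by omega)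
    have hlen' : (ans.set nR ((ans.getD nR []).set nC (last1 + 1))).length = rows.toNat := by
      simpa using hlen
    have hrowlen' : ∀ row ∈ ans.set nR ((ans.getD nR []).set nC (last1 + 1)),
        row.length = columns.toNat := by
      intro row hmem
      rcases List.mem_or_eq_of_mem_set hmem with h | h
      · exact hrowlen _ h
      · subst h
        rw [List.length_set]
        exact hrowlen _ (pvGetD_mem ans nR [] hRlen)
    by_cases hc0 : (ans.getD nR []).getD nC 0 = 0
    · rw [if_pos hc0, if_neg (fun hand => hand.1 hc0)]
      rw [show pvSetCellA ans nR nC (last1 + 1)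
          = ans.set nR ((ans.getD nR []).set nC (last1 + 1)) from rfl]
      rw [ih _ nR nC (last1 + 1) hlen' hrowlen' hRlt hClt (by omega)]
      rw [if_pos hc0] at hset
      rw [if_pos hc0]
      congr 1
      omega
    · by_cases hpar : PySem.Int.mod ((ans.getD nR []).getD nC 0) 2
          = PySem.Int.mod (last1 + 1) 2
      · rw [if_neg hc0, if_pos (Or.inl hpar), if_pos ⟨hc0, hpar⟩]
      · rw [if_neg hc0, if_neg (by tauto), if_neg (by tauto)]
        rw [show pvSetCellA ans nR nC (last1 + 1)
            = ans.set nR ((ans.getD nR []).set nC (last1 + 1)) from rfl]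
        rw [ih _ nR nC (last1 + 1) hlen' hrowlen' hRlt hClt (by omega)]
        rw [if_neg hc0] at hset
        rw [if_neg hc0]
        congr 1
        omega

theorem loop_eq (rows columns : Int) (hrows : 1 ≤ rows) (hcols : 1 ≤ columns) :
    ∀ (fuel : Nat) (ans : List (List Int)) (nowR nowC : Nat) (lastNum : Int),
    ans.length = rows.toNat →
    (∀ row ∈ ans, row.length = columns.toNat) →
    nowR < rows.toNat → nowC < columns.toNat → 1 ≤ lastNum →
    pvLoopA rows columns fuel ans nowR nowC lastNum
      = pvLoopB rows columns fuel ans nowR nowC lastNum ((pvZeros ans : Int)) := by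
  intro fuel
  induction fuel with
  | zero => intro ans nowR nowC lastNum _ _ _ _ _; rfl
  | succ fuel ih =>
    intro ans nowR nowC lastNum hlen hrowlen hR hC hlast
    rw [pvLoopA, pvLoopB]
    rcases PySem.Int.mod_two_eq lastNum with hm | hm <;>
      simp only [hm, ite_true, ite_false,
        (by norm_num : (((0:Int) = 1)) = False), (by norm_num : (((1:Int) = 0)) = False)]
    · exact step_eq rows columns hrows hcols fuel ih ans _ nowC lastNum hlen hrowlen
        (move_lt rows nowR hrows hR) hC hlast
    · exact step_eq rows columns hrows hcols fuel ih ans nowR _ lastNum hlen hrowlen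
        hR (move_lt columns nowC hcols hC) hlast

theorem pvZeros_init (r c : Nat) (hr : 1 ≤ r) (hc : 1 ≤ c) :
    pvZeros ((List.replicate r (List.replicate c (0:Int))).set 0
      (((List.replicate r (List.replicate c (0:Int))).getD 0 []).set 0 1)) = r * c - 1 := by
  have h1 : pvZeros (List.replicate r (List.replicate c (0:Int))) = r * c := by
    simp [pvZeros, List.map_replicate, List.countP_eq_length_filter]
  have := pvZeros_set (List.replicate r (List.replicate c (0:Int))) 0 0 1
    (by simpa using hr) (by cases r with | zero => omega | succ n => simpa using hc)
    (by norm_num)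
  rw [h1] at this
  have hget : ((List.replicate r (List.replicate c (0:Int))).getD 0 []).getD 0 0 = 0 := by
    cases r with
    | zero => omega
    | succ n =>
      cases c with
      | zero => omega
      | succ m => simp [List.replicate_succ]
  rw [hget] at this
  simpa using this

-- ===== VERDICT (by name: the statement is the Claim_ definition above) =====
theorem solution_spec : Claim_equal_solution := by
  intro rows columns _ hpre
  obtain ⟨hr, hc⟩ := hpre
  unfold Spec_solution solution solution_alt
  simp only [pvSetCellA]
  rw [loop_eq rows columns hr hc _ _ 0 0 1
    (by simp)
    (by
      intro row hmem
      rcases List.mem_or_eq_of_mem_set hmem with h | h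
      · rcases List.eq_of_mem_replicate h with rfl; simp
      · subst h
        rw [List.length_set]
        cases hrn : rows.toNat with
        | zero => omega
        | succ n => simp [List.replicate_succ])
    (by omega) (by omega) (by omega)]
  congr 1
  have := pvZeros_init rows.toNat columns.toNat (by omega) (by omega)
  rw [this]
  have h1 : 1 ≤ rows.toNat * columns.toNat := by
    have h2 : 1 ≤ rows.toNat := by omega
    have h3 : 1 ≤ columns.toNat := by omega
    simpa using Nat.mul_le_mul h2 h3
  push_cast [Nat.cast_sub h1]
  rw [Int.toNat_of_nonneg (by omega), Int.toNat_of_nonneg (by omega)]
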